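-- pv_equiv track=rewrite | github.com/hashgraph/hedera-sdk-java | scripts/update_protobufs.py | ensure_cap_snake_name
-- ===== SOURCE A (Python) =====
-- def id_is_next(name, i):
--     if (i + 1) < len(name):
--         return name[i:i+2] == "ID"
--     return False
--
-- def ensure_cap_snake_name(name):
--     # assume that name is snake-case if it contains a _ or is not mixed-case
--     has_underscore = "_" in name
--     is_not_mixed = name.isupper() or name.islower()
--     if has_underscore or (not has_underscore and is_not_mixed):
--         return name.upper()
--     else:
--         out = name[0].upper()
--         i = 1
--         while i < len(name):
--             if id_is_next(name, i):
--                 out += "_ID"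
--                 i += 2
--             else:
--                 c = name[i]
--                 if c.isupper():
--                     out += "_"
--                 out += c.upper()
--                 i += 1
--         return out
-- ===== SOURCE B (Python) =====
-- def ensure_cap_snake_name(name):
--     # same guard as A: snake-case already, or not mixed-case -> just upper-case it
--     has_underscore = "_" in name
--     is_not_mixed = name.isupper() or name.islower()
--     if has_underscore or (not has_underscore and is_not_mixed):
--         return name.upper()
--     # forward pass: underscore before each uppercase char, everything upper-cased
--     out = name[0].upper()
--     for c in name[1:]:
--         if c.isupper():
--             out += "_"
--         out += c.upper()
--     # merge uppercase "ID" pairs in one post-processing pass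
--     return out.replace("_I_D", "_ID")
-- ===== Notes on version B (the rewrite author's own statement) =====
-- stated objective: simpler
-- what changed: Replaces the index-based while loop with id_is_next lookahead by a plain forward pass over the characters plus a single post-processing replace('_I_D', '_ID') that merges the ID pairs.
import Mathlib
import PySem

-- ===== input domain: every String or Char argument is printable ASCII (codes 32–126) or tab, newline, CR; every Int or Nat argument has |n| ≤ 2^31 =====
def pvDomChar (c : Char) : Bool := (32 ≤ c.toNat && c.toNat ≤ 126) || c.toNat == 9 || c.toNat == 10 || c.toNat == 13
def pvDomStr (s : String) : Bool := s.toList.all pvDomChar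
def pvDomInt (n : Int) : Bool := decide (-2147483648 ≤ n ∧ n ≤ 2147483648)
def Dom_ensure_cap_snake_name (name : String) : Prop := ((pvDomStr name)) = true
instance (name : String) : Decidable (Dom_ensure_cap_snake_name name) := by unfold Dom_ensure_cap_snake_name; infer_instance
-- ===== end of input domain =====

-- B replaces A's index-based while loop with ID lookahead by a plain forward pass plus one replace("_I_D", "_ID"); objective: simpler.

-- ===== PORT A =====

-- Python name.isupper() / name.islower(): some cased char, and no char cased the other way
-- (hand-ported: PySem has no string-level isupper/islower; exact on the ASCII domain)
def pyStrIsupper (cs : List Char) : Bool :=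
  cs.any (fun c => PySem.Chars.isupper c || PySem.Chars.islower c) && cs.all (fun c => !PySem.Chars.islower c)
def pyStrIslower (cs : List Char) : Bool :=
  cs.any (fun c => PySem.Chars.isupper c || PySem.Chars.islower c) && cs.all (fun c => !PySem.Chars.isupper c)

-- helper id_is_next(name, i)
def id_is_next (cs : List Char) (i : Nat) : Bool :=
  if i + 1 < cs.length then PySem.List.slice cs (some (i : Int)) (some ((i : Int) + 2)) == ['I', 'D'] else false

-- A's while loop: index i, accumulator out
def ensure_cap_snake_name_loop (cs : List Char) (i : Nat) (out : List Char) : List Char :=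
  if h : i < cs.length then
    if id_is_next cs i then
      ensure_cap_snake_name_loop cs (i + 2) (out ++ ['_', 'I', 'D'])
    else
      ensure_cap_snake_name_loop cs (i + 1)
        (out ++ (if PySem.Chars.isupper cs[i] then ['_'] else []) ++ [PySem.Chars.upperChar cs[i]])
  else out
termination_by cs.length - i

def ensure_cap_snake_name (name : String) : String :=
  let cs := name.toList
  let has_underscore := PySem.Chars.isIn ['_'] cs
  let is_not_mixed := pyStrIsupper cs || pyStrIslower cs
  if has_underscore || (!has_underscore && is_not_mixed) then
    String.ofList (PySem.Chars.upper cs)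
  else
    match cs with
    | [] => ""   -- Python raises IndexError on name[0] here; excluded by Pre_
    | c0 :: _ => String.ofList (ensure_cap_snake_name_loop cs 1 [PySem.Chars.upperChar c0])

-- ===== PORT B =====

def ensure_cap_snake_name_alt (name : String) : String :=
  let cs := name.toList
  let has_underscore := PySem.Chars.isIn ['_'] cs
  let is_not_mixed := pyStrIsupper cs || pyStrIslower cs
  if has_underscore || (!has_underscore && is_not_mixed) then
    String.ofList (PySem.Chars.upper cs)
  else
    match cs with
    | [] => ""   -- Python raises IndexError on name[0] here; excluded by Pre_
    | c0 :: rest =>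
      let out := rest.foldl
        (fun out c => out ++ (if PySem.Chars.isupper c then ['_'] else []) ++ [PySem.Chars.upperChar c])
        [PySem.Chars.upperChar c0]
      String.ofList (PySem.Chars.replace out ['_', 'I', '_', 'D'] ['_', 'I', 'D'])

-- ===== PRECONDITION & SPEC =====
-- Pre_ excludes exactly the empty string, on which A (and B alike) raises IndexError at name[0].
def Pre_ensure_cap_snake_name (name : String) : Prop := name ≠ ""
instance (name : String) : Decidable (Pre_ensure_cap_snake_name name) := by
  unfold Pre_ensure_cap_snake_name; infer_instance

def pvWitness_ensure_cap_snake_name : String := "maxFileID"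

def Spec_ensure_cap_snake_name (name : String) (out : String) : Prop := out = ensure_cap_snake_name_alt name
instance (name : String) (out : String) : Decidable (Spec_ensure_cap_snake_name name out) := by
  unfold Spec_ensure_cap_snake_name; infer_instance

-- ===== CLAIM (what is proved, stated in full; the proofs are below) =====
def Claim_equal_ensure_cap_snake_name : Prop := ∀ (name : String), Dom_ensure_cap_snake_name name → Pre_ensure_cap_snake_name name → Spec_ensure_cap_snake_name name (ensure_cap_snake_name name)

-- ===== LEMMAS AND PROOFS =====

-- the merged per-character spec both ports are reduced to
def ecsSpec : List Char → List Char
  | [] => []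
  | 'I' :: 'D' :: t => '_' :: 'I' :: 'D' :: ecsSpec t
  | c :: t => (if PySem.Chars.isupper c then ['_'] else []) ++ [PySem.Chars.upperChar c] ++ ecsSpec t

-- B's forward pass written as plain recursion
def ecsPass : List Char → List Char
  | [] => []
  | c :: t => (if PySem.Chars.isupper c then ['_'] else []) ++ [PySem.Chars.upperChar c] ++ ecsPass t

-- first-occurrence replace("_I_D" -> "_ID") as plain recursion (mirrors PySem.Chars.replace.go)
def ecsRep : List Char → List Char
  | [] => []
  | c :: t =>
    if ['_', 'I', '_', 'D'].isPrefixOf (c :: t) then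
      '_' :: 'I' :: 'D' :: ecsRep (t.drop 3)
    else c :: ecsRep t
termination_by l => l.length
decreasing_by
  · simp only [List.length_drop, List.length_cons]; omega
  · simp only [List.length_cons]; omega

lemma ecsRep_nil : ecsRep [] = [] := by unfold ecsRep; rfl

lemma upperChar_ne_underscore {c : Char} (h : c ≠ '_') : PySem.Chars.upperChar c ≠ '_' := by
  unfold PySem.Chars.upperChar PySem.Chars.islower
  split_ifs with hl
  · simp only [Bool.and_eq_true, decide_eq_true_eq] at hl
    intro he
    have h1 : (97:Nat) ≤ c.toNat := hl.1
    have h2 : c.toNat ≤ 122 := hl.2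
    have hv : (c.toNat - 32).isValidChar := by
      constructor; omega
    have := congrArg Char.toNat he
    rw [Char.toNat_ofNat, if_pos hv] at this
    have : c.toNat - 32 = 95 := this
    omega
  · exact h

lemma isupper_upperChar_self {c : Char} (h : PySem.Chars.isupper c = true) :
    PySem.Chars.upperChar c = c := by
  unfold PySem.Chars.upperChar
  unfold PySem.Chars.isupper at h
  unfold PySem.Chars.islower
  simp only [Bool.and_eq_true, decide_eq_true_eq] at h
  split_ifs with hl
  · exfalso
    simp only [Bool.and_eq_true, decide_eq_true_eq] at hl
    have h1 : c.toNat ≤ 90 := h.2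
    have h2 : (97:Nat) ≤ c.toNat := hl.1
    omega
  · rfl

lemma ecsRep_cons (c : Char) (t : List Char) :
    ecsRep (c :: t) = if ['_', 'I', '_', 'D'].isPrefixOf (c :: t) then
      '_' :: 'I' :: 'D' :: ecsRep (t.drop 3) else c :: ecsRep t := by
  conv_lhs => unfold ecsRep

lemma ecsRep_cons_ne {c : Char} (h : c ≠ '_') (t : List Char) :
    ecsRep (c :: t) = c :: ecsRep t := by
  rw [ecsRep_cons]
  have hb : ('_' == c) = false := beq_eq_false_iff_ne.mpr (Ne.symm h)
  simp [List.isPrefixOf, hb]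

lemma ecsSpec_cons (c : Char) (t : List Char)
    (hcond : ∀ t1, c = 'I' → t = 'D' :: t1 → False) :
    ecsSpec (c :: t) =
      (if PySem.Chars.isupper c then ['_'] else []) ++ [PySem.Chars.upperChar c] ++ ecsSpec t := by
  rw [ecsSpec.eq_def]
  split
  · rename_i heq; exact absurd heq (by simp)
  · rename_i t1 heq
    injection heq with h1 h2
    exact ((hcond t1 h1 h2).elim)
  · rename_i c1 t1 heq
    injection heq with h1 h2
    subst h1; subst h2; rfl

-- the crux: running the replace over B's pass output yields the merged spec
lemma ecsRep_pass {t : List Char} (h : '_' ∉ t) : ecsRep (ecsPass t) = ecsSpec t := by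
  induction t using ecsSpec.induct with
  | case1 => simp only [ecsPass, ecsSpec, ecsRep_nil]
  | case2 t iht =>
    have h' : '_' ∉ t := fun hm => h (by simp [hm])
    have hDu : PySem.Chars.isupper 'D' = true := by decide
    have hIu : PySem.Chars.isupper 'I' = true := by decide
    show ecsRep (ecsPass ('I' :: 'D' :: t)) = ecsSpec ('I' :: 'D' :: t)
    rw [show ecsPass ('I' :: 'D' :: t) = '_' :: 'I' :: '_' :: 'D' :: ecsPass t by
      simp [ecsPass, hIu, hDu, show PySem.Chars.upperChar 'I' = 'I' from by decide,
        show PySem.Chars.upperChar 'D' = 'D' from by decide]]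
    rw [ecsRep_cons, if_pos (by simp [List.isPrefixOf])]
    simp only [List.drop_succ_cons, List.drop_zero]
    rw [iht h']
    rfl
  | case3 c t hcond iht =>
    have hc : c ≠ '_' := fun he => h (by simp [he])
    have h' : '_' ∉ t := fun hm => h (by simp [hm])
    rw [ecsSpec_cons c t hcond]
    by_cases hu : PySem.Chars.isupper c = true
    · have hcc : PySem.Chars.upperChar c = c := isupper_upperChar_self hu
      have hpass : ecsPass (c :: t) = '_' :: c :: ecsPass t := by
        simp [ecsPass, hu, hcc]
      rw [hpass]
      have hnp : (['_', 'I', '_', 'D'].isPrefixOf ('_' :: c :: ecsPass t)) = false := by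
        by_cases hcI : c = 'I'
        · subst hcI
          match t, h' with
          | [], _ => simp [ecsPass, List.isPrefixOf]
          | d :: t', h' =>
            have hd' : d ≠ '_' := fun he => h' (by simp [he])
            by_cases hdu : PySem.Chars.isupper d = true
            · have hdd : PySem.Chars.upperChar d = d := isupper_upperChar_self hdu
              have hdD : d ≠ 'D' := fun he => hcond t' rfl (by rw [he])
              simp [ecsPass, hdu, hdd, List.isPrefixOf]
              intro h1
              exact absurd h1.symm hdD
            · have hdu' : PySem.Chars.isupper d = false := Bool.eq_false_iff.mpr hdu
              have hdnu : PySem.Chars.upperChar d ≠ '_' := upperChar_ne_underscore hd'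
              simp [ecsPass, hdu', List.isPrefixOf]
              intro h1
              exact absurd h1.symm hdnu
        · simp [List.isPrefixOf]
          intro h1
          exact absurd h1.symm hcI
      rw [ecsRep_cons, if_neg (by simp [hnp])]
      rw [ecsRep_cons_ne hc, iht h']
      simp [hu, hcc]
    · have hu' : PySem.Chars.isupper c = false := Bool.eq_false_iff.mpr hu
      have hpass : ecsPass (c :: t) = PySem.Chars.upperChar c :: ecsPass t := by
        simp [ecsPass, hu']
      rw [hpass, ecsRep_cons_ne (upperChar_ne_underscore hc), iht h']
      simp [hu']

-- B's fold equals acc ++ ecsPass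
lemma foldl_ecsPass (t : List Char) (acc : List Char) :
    t.foldl (fun out c => out ++ (if PySem.Chars.isupper c then ['_'] else []) ++ [PySem.Chars.upperChar c]) acc
      = acc ++ ecsPass t := by
  induction t generalizing acc with
  | nil => simp [ecsPass]
  | cons c t ih =>
    rw [List.foldl_cons, ih]
    conv_rhs => rw [ecsPass]
    simp [List.append_assoc]

-- PySem's replace.go with enough fuel equals acc.reverse ++ ecsRep
lemma replace_go_eq (fuel : Nat) (l acc : List Char) (hf : l.length ≤ fuel) :
    PySem.Chars.replace.go ['_', 'I', '_', 'D'] ['_', 'I', 'D'] fuel l acc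
      = acc.reverse ++ ecsRep l := by
  induction fuel generalizing l acc with
  | zero =>
    have : l = [] := List.eq_nil_of_length_eq_zero (Nat.le_zero.mp hf)
    subst this
    simp [PySem.Chars.replace.go, ecsRep_nil]
  | succ n ih =>
    match l with
    | [] => simp [PySem.Chars.replace.go, ecsRep_nil]
    | c :: t =>
      rw [PySem.Chars.replace.go]
      rw [ecsRep_cons]
      by_cases hp : ['_', 'I', '_', 'D'].isPrefixOf (c :: t) = true
      · rw [if_pos hp, if_pos hp]
        have hlen : ((c :: t).drop 4).length ≤ n := by
          simp only [List.length_drop, List.length_cons]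
          simp only [List.length_cons] at hf
          omega
        rw [ih _ _ (by simpa using hlen)]
        simp
      · rw [if_neg hp, if_neg hp]
        have : t.length ≤ n := by simpa using hf
        rw [ih _ _ this]
        simp

lemma replace_eq_ecsRep (l : List Char) :
    PySem.Chars.replace l ['_', 'I', '_', 'D'] ['_', 'I', 'D'] = ecsRep l := by
  rw [PySem.Chars.replace]
  rw [if_neg (by simp)]
  simpa using replace_go_eq l.length l [] le_rfl

lemma id_is_next_true {cs : List Char} {i : Nat} (h : id_is_next cs i = true) :
    cs.drop i = 'I' :: 'D' :: cs.drop (i + 2) := by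
  unfold id_is_next at h
  split at h
  · rename_i hlt
    have hs : PySem.List.slice cs (some (i : Int)) (some ((i : Int) + 2)) = List.take 2 (List.drop i cs) := by
      have : ((i : Int) + 2) = ((i + 2 : Nat) : Int) := by push_cast; ring
      rw [this, PySem.List.slice_natCast]
      congr 1
      omega
    rw [hs] at h
    have htake : List.take 2 (List.drop i cs) = ['I', 'D'] := by simpa using h
    have := (List.take_append_drop 2 (cs.drop i)).symm
    rw [htake] at this
    rw [List.drop_drop] at this
    simpa using this
  · exact absurd h (by simp)

lemma id_is_next_false {cs : List Char} {i : Nat} (hlt : i < cs.length)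
    (h : id_is_next cs i = false) :
    ∀ t1, cs[i] = 'I' → cs.drop (i + 1) = 'D' :: t1 → False := by
  intro t1 hI hD
  unfold id_is_next at h
  have hdrop : cs.drop i = cs[i] :: cs.drop (i + 1) := List.drop_eq_getElem_cons hlt
  have hlen : i + 1 < cs.length := by
    have := congrArg List.length hD
    simp only [List.length_drop, List.length_cons] at this
    omega
  rw [if_pos hlen] at h
  have hs : PySem.List.slice cs (some (i : Int)) (some ((i : Int) + 2)) = List.take 2 (List.drop i cs) := by
    have : ((i : Int) + 2) = ((i + 2 : Nat) : Int) := by push_cast; ring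
    rw [this, PySem.List.slice_natCast]
    congr 1
    omega
  rw [hs, hdrop, hI, hD] at h
  simp at h

-- A's loop from index i equals out ++ ecsSpec (cs.drop i)
lemma loop_eq_spec (cs : List Char) (i : Nat) (out : List Char) :
    ensure_cap_snake_name_loop cs i out = out ++ ecsSpec (cs.drop i) := by
  induction i, out using ensure_cap_snake_name_loop.induct (cs := cs) with
  | case1 i out hlt hid ih =>
    rw [ensure_cap_snake_name_loop, dif_pos hlt, if_pos hid, ih]
    rw [id_is_next_true hid]
    rw [show ecsSpec ('I' :: 'D' :: cs.drop (i + 2)) = '_' :: 'I' :: 'D' :: ecsSpec (cs.drop (i + 2)) from rfl]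
    simp
  | case2 i out hlt hid ih =>
    simp only [dite_eq_ite] at ih
    rw [ensure_cap_snake_name_loop, dif_pos hlt, if_neg (by simp [hid]), ih]
    rw [List.drop_eq_getElem_cons hlt]
    rw [ecsSpec_cons _ _ (id_is_next_false hlt (by simpa using hid))]
    simp
  | case3 i out hge =>
    rw [ensure_cap_snake_name_loop, dif_neg hge]
    rw [List.drop_eq_nil_of_le (by omega)]
    simp [ecsSpec]

-- ===== VERDICT (by name: the statement is the Claim_ definition above) =====
theorem ensure_cap_snake_name_spec : Claim_equal_ensure_cap_snake_name := by
  intro name _hdom hpre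
  unfold Pre_ensure_cap_snake_name at hpre
  unfold Spec_ensure_cap_snake_name
  unfold ensure_cap_snake_name ensure_cap_snake_name_alt
  by_cases hcond : (PySem.Chars.isIn ['_'] name.toList ||
      (!PySem.Chars.isIn ['_'] name.toList && (pyStrIsupper name.toList || pyStrIslower name.toList))) = true
  · simp only [hcond, if_true]
  · simp only [hcond, Bool.false_eq_true, if_false]
    have hund : PySem.Chars.isIn ['_'] name.toList = false := by
      rcases Bool.or_eq_false_iff.mp (Bool.eq_false_iff.mpr hcond) with ⟨h1, _⟩
      exact h1
    have hmem : '_' ∉ name.toList := by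
      intro hm
      have : ['_'] <:+: name.toList := by
        rcases List.mem_iff_append.mp hm with ⟨s, t, hst⟩
        exact ⟨s, t, by simp [hst]⟩
      rw [← PySem.Chars.isIn_iff_infix] at this
      rw [hund] at this
      exact absurd this (by simp)
    match hcs : name.toList with
    | [] =>
      refine absurd ?_ hpre
      have h2 := congrArg String.ofList hcs
      rwa [String.ofList_toList] at h2
    | c0 :: rest =>
      rw [hcs] at hmem
      have hc0 : c0 ≠ '_' := fun he => hmem (by simp [he])
      have hrest : '_' ∉ rest := fun hm => hmem (by simp [hm])
      show String.ofList (ensure_cap_snake_name_loop (c0 :: rest) 1 [PySem.Chars.upperChar c0]) =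
        String.ofList (PySem.Chars.replace
          (List.foldl
            (fun out c => out ++ (if PySem.Chars.isupper c then ['_'] else []) ++ [PySem.Chars.upperChar c])
            [PySem.Chars.upperChar c0] rest)
          ['_', 'I', '_', 'D'] ['_', 'I', 'D'])
      rw [loop_eq_spec]
      rw [foldl_ecsPass, replace_eq_ecsRep]
      rw [show ([PySem.Chars.upperChar c0] ++ ecsPass rest) = PySem.Chars.upperChar c0 :: ecsPass rest from rfl]
      rw [ecsRep_cons_ne (upperChar_ne_underscore hc0)]
      rw [ecsRep_pass hrest]
      simp
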